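-- pv_equiv track=rewrite | github.com/vedansh-peepre/Python-notes | L16 - recursion for non numerics.py | in_lists_of_list
-- ===== SOURCE A (Python) =====
-- def in_lists_of_list(L, e):
--     """
--     L is a list whose elements are lists containing ints
--     Returns True if e is an element within the lists of L
--     and False otherwise.
--     Hint, the in operator is useful here, i.e. e in something
--     """
--     # your code here
--     # if len(L) == 1:
--     #     if type(L[0]) == int():
--     #         return L[0] == e
--     #     else:
--     #         return in_lists_of_list(L[0], e)
--     # else:
--     #     if type(L) == int():
--     #         return in_lists_of_list(L[1:], e)
--     #     else:
--     #         return
--     #     # return in_lists_of_list(L[1:], e)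
--
--     #solution-
--     if len(L) == 1:
--         return e in L[0]
--     else:
--         first = L[0]
--         if e in first:
--             return True
--         else:
--             return in_lists_of_list(L[1:], e)
-- ===== SOURCE B (Python) =====
-- def in_lists_of_list(L, e):
--     return any(e in sub for sub in L)
-- ===== Notes on version B (the rewrite author's own statement) =====
-- stated objective: idiomatic
-- what changed: Replaces the hand-written recursion over L[1:] with the idiomatic any(e in sub for sub in L); Pre_ excludes the empty list, on which A raises IndexError (B returns False there).
import Mathlib
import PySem

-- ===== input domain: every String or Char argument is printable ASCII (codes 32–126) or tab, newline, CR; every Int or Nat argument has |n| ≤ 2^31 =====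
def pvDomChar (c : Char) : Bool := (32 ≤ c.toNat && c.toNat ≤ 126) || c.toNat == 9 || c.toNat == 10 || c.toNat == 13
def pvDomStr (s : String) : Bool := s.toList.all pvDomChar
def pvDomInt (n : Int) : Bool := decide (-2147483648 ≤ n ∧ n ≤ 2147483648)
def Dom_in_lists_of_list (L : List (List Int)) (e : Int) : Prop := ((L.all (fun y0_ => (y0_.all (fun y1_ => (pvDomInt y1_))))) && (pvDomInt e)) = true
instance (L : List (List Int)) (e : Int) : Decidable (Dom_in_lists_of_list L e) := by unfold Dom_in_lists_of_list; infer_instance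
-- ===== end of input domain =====

-- B replaces A's explicit recursion over L[1:] with the idiomatic any(e in sub for sub in L).

-- ===== PORT A =====
-- recursion: len(L)==1 → e in L[0]; else test L[0], recurse on L[1:]; empty L raises (excluded by Pre_)
def in_lists_of_list (L : List (List Int)) (e : Int) : Bool :=
  match L with
  | [] => false                  -- Python: IndexError, outside Pre_
  | [s] => s.contains e          -- len(L) == 1: e in L[0]
  | first :: rest =>             -- first = L[0]; rest = L[1:]
    if first.contains e then true
    else in_lists_of_list rest e

-- ===== PORT B =====
-- any(e in sub for sub in L)
def in_lists_of_list_alt (L : List (List Int)) (e : Int) : Bool :=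
  L.any (fun sub => sub.contains e)

-- ===== PRECONDITION & SPEC =====
-- Pre_ excludes exactly the empty list, on which the Python A raises IndexError.
def Pre_in_lists_of_list (L : List (List Int)) (e : Int) : Prop := L ≠ []
instance (L : List (List Int)) (e : Int) : Decidable (Pre_in_lists_of_list L e) := by unfold Pre_in_lists_of_list; infer_instance
def pvWitness_in_lists_of_list : List (List Int) × Int := ([[1, 2], [3]], 3)

def Spec_in_lists_of_list (L : List (List Int)) (e : Int) (out : Bool) : Prop := out = in_lists_of_list_alt L e
instance (L : List (List Int)) (e : Int) (out : Bool) : Decidable (Spec_in_lists_of_list L e out) := by unfold Spec_in_lists_of_list; infer_instance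

-- ===== CLAIM =====
def Claim_equal_in_lists_of_list : Prop := ∀ (L : List (List Int)) (e : Int), Dom_in_lists_of_list L e → Pre_in_lists_of_list L e → Spec_in_lists_of_list L e (in_lists_of_list L e)

-- ===== LEMMAS AND PROOFS =====
theorem agree (L : List (List Int)) (e : Int) (h : L ≠ []) :
    in_lists_of_list L e = in_lists_of_list_alt L e := by
  induction L with
  | nil => exact absurd rfl h
  | cons s rest ih =>
    cases rest with
    | nil => simp [in_lists_of_list, in_lists_of_list_alt]
    | cons t rs =>
      have ihr := ih (by simp)
      simp only [in_lists_of_list, in_lists_of_list_alt, List.any_cons] at ihr ⊢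
      by_cases hs : s.contains e = true <;> simp [hs, ihr]

-- ===== VERDICT =====
theorem in_lists_of_list_spec : Claim_equal_in_lists_of_list := by
  intro L e _ hpre
  unfold Spec_in_lists_of_list
  exact agree L e hpre
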